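-- pv_equiv track=rewrite | github.com/whatasame/BaekjoonHub | 프로그래머스/3/64062. 징검다리 건너기/징검다리 건너기.py | movable
-- ===== SOURCE A (Python) =====
-- def movable(stones, k):
--     zero_cnt = 0
--     for stone in stones:
--         if stone == 0:
--             zero_cnt += 1
--         else:
--             zero_cnt = 0
--         if zero_cnt >= k:
--             return False
--
--     return True
-- ===== SOURCE B (Python) =====
-- def movable(stones, k):
--     # Window check via prefix sums: crossable iff every window of k consecutive
--     # stones contains a nonzero stone, i.e. no window consists of k zeros.
--     # An empty path is trivially crossable; a non-positive jump range makes any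
--     # non-empty path uncrossable.
--     if not stones:
--         return True
--     if k <= 0:
--         return False
--     zeros = [0]
--     for x in stones:
--         zeros.append(zeros[-1] + (x == 0))
--     return all(zeros[i + k] - zeros[i] < k for i in range(len(stones) - k + 1))
-- ===== Notes on version B (the rewrite author's own statement) =====
-- stated objective: alternative
-- what changed: Replaces the streaming zero-run counter with early exit by a staged sliding-window check: first build a prefix-sum array of zero counts, then test every window of k consecutive stones for being all zeros.
import Mathlib
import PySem

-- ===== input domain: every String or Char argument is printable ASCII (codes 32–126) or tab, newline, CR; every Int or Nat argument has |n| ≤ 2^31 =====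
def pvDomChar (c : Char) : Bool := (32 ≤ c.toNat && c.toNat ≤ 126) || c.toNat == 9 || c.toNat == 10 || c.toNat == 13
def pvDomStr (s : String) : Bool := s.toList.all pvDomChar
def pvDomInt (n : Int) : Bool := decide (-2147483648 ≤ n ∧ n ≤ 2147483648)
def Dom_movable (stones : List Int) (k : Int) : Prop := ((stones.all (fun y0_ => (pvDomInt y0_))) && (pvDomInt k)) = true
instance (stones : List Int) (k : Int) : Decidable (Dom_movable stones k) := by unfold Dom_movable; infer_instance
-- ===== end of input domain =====

-- B replaces A's streaming zero-counter with early exit by a sliding-window check: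
-- every window of k consecutive stones must contain a nonzero stone (alternative; O(n*k), not faster).


-- ===== PORT A =====
-- the for-loop with the running zero_cnt and the early `return False`
def movableLoop (stones : List Int) (k : Int) (zero_cnt : Int) : Bool :=
  match stones with
  | [] => true
  | stone :: rest =>
    let zero_cnt' := if stone = 0 then zero_cnt + 1 else 0
    if zero_cnt' ≥ k then false else movableLoop rest k zero_cnt'

def movable (stones : List Int) (k : Int) : Bool :=
  movableLoop stones k 0

-- ===== PORT B =====
-- the zeros-prefix-sum list: `zeros = [0]; for x in stones: zeros.append(zeros[-1] + (x == 0))`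
def zerosPrefix (stones : List Int) : List Int :=
  stones.foldl
    (fun z x => z ++ [(PySem.List.pyGet? z (-1)).getD 0 + (if x = 0 then (1 : Int) else 0)]) [0]

-- `all(zeros[i + k] - zeros[i] < k for i in range(len(stones) - k + 1))`
def movable_alt (stones : List Int) (k : Int) : Bool :=
  if stones = [] then true
  else if k ≤ 0 then false
  else
    let zeros := zerosPrefix stones
    (PySem.List.pyRange 0 ((stones.length : Int) - k + 1) 1).all
      (fun i =>
        decide ((PySem.List.pyGet? zeros (i + k)).getD 0 - (PySem.List.pyGet? zeros i).getD 0 < k))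

-- ===== PRECONDITION & SPEC =====
def Spec_movable (stones : List Int) (k : Int) (out : Bool) : Prop := out = movable_alt stones k
instance (stones : List Int) (k : Int) (out : Bool) : Decidable (Spec_movable stones k out) := by unfold Spec_movable; infer_instance

-- ===== CLAIM (what is proved, stated in full; the proofs are below) =====
def Claim_equal_movable : Prop := ∀ (stones : List Int) (k : Int), Dom_movable stones k → Spec_movable stones k (movable stones k)

-- ===== LEMMAS AND PROOFS =====

-- a zero prefix of length ≥ k yields a block of k zeros
lemma zero_prefix_infix (k : Int) (hk : 1 ≤ k) (xs p : List Int)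
    (hp : p <+: xs) (hz : ∀ y ∈ p, y = (0 : Int)) (hl : k ≤ (p.length : Int)) :
    List.replicate k.toNat (0 : Int) <:+: xs := by
  have hK : k.toNat ≤ p.length := by omega
  have hrep : p = List.replicate p.length (0 : Int) := List.eq_replicate_of_mem hz
  have h1 : List.replicate k.toNat (0 : Int) <+: p := by
    rw [hrep]
    have := List.take_prefix k.toNat (List.replicate p.length (0 : Int))
    rwa [List.take_replicate, min_eq_left hK] at this
  exact (h1.trans hp).isInfix

-- A's loop returns False iff either the pending run of zeros (counted from cnt)
-- completes to k at the front, or a block of k zeros occurs somewhere in xs.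
lemma loop_false_iff (k : Int) (hk : 1 ≤ k) (xs : List Int) :
    ∀ cnt : Int, 0 ≤ cnt → cnt < k →
    (movableLoop xs k cnt = false ↔
      (∃ p : List Int, p <+: xs ∧ (∀ y ∈ p, y = (0 : Int)) ∧ k ≤ cnt + p.length) ∨
      List.replicate k.toNat (0 : Int) <:+: xs) := by
  induction xs with
  | nil =>
    intro cnt h0 hlt
    simp only [movableLoop]
    constructor
    · intro h; exact absurd h (by simp)
    · rintro (⟨p, hp, _, hl⟩ | hinf)
      · rw [List.prefix_nil] at hp
        subst hp; simp at hl; omega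
      · rw [List.infix_nil] at hinf
        have : k.toNat = 0 := by simpa [List.replicate_eq_nil_iff] using hinf
        omega
  | cons x rest ih =>
    intro cnt h0 hlt
    simp only [movableLoop]
    by_cases hge : (if x = 0 then cnt + 1 else 0) ≥ k
    · have hx0 : x = 0 := by by_contra hx; simp [hx] at hge; omega
      rw [if_pos hge]
      simp only [true_iff]
      exact Or.inl ⟨[x], ⟨rest, rfl⟩, by simp [hx0], by simp [hx0] at hge ⊢; omega⟩
    · rw [if_neg hge]
      have hc0 : 0 ≤ (if x = 0 then cnt + 1 else 0) := by split_ifs <;> omega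
      have hck : (if x = 0 then cnt + 1 else 0) < k := by omega
      rw [ih _ hc0 hck]
      have hKpos : k.toNat ≠ 0 := by omega
      by_cases hx0 : x = 0
      · subst hx0
        simp only [if_true] at *
        constructor
        · rintro (⟨p, hp, hz, hl⟩ | hinf)
          · exact Or.inl ⟨0 :: p, List.cons_prefix_cons.mpr ⟨rfl, hp⟩, by
              intro y hy; rcases List.mem_cons.mp hy with h | h
              · exact h
              · exact hz y h, by simp; omega⟩
          · exact Or.inr (List.infix_cons hinf)
        · rintro (⟨p, hp, hz, hl⟩ | hinf)
          · rcases List.prefix_cons_iff.mp hp with rfl | ⟨p', rfl, hp'⟩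
            · simp at hl; omega
            · exact Or.inl ⟨p', hp', fun y hy => hz y (List.mem_cons_of_mem _ hy), by
                simp at hl ⊢; omega⟩
          · rcases (List.infix_cons_iff.mp hinf) with hpre | hinf'
            · -- replicate K 0 is a prefix of 0 :: rest
              rcases Nat.exists_eq_succ_of_ne_zero hKpos with ⟨K', hK'⟩
              rw [hK', List.replicate_succ, List.cons_prefix_cons] at hpre
              exact Or.inl ⟨List.replicate K' 0, hpre.2, fun y hy => List.eq_of_mem_replicate hy, by
                simp; omega⟩
            · exact Or.inr hinf'
      · simp only [if_neg hx0] at *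
        constructor
        · rintro (⟨p, hp, hz, hl⟩ | hinf)
          · -- p is a zero prefix of rest of length ≥ k: yields the infix in rest
            exact Or.inr (List.infix_cons (zero_prefix_infix k hk rest p hp hz (by omega)))
          · exact Or.inr (List.infix_cons hinf)
        · rintro (⟨p, hp, hz, hl⟩ | hinf)
          · -- impossible: a nonempty zero prefix of x :: rest would force x = 0
            rcases List.prefix_cons_iff.mp hp with rfl | ⟨p', rfl, hp'⟩
            · simp at hl; omega
            · exact absurd (hz x (List.mem_cons_self)) hx0
          · rcases (List.infix_cons_iff.mp hinf) with hpre | hinf'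
            · rcases Nat.exists_eq_succ_of_ne_zero hKpos with ⟨K', hK'⟩
              rw [hK', List.replicate_succ, List.cons_prefix_cons] at hpre
              exact absurd hpre.1.symm hx0
            · exact Or.inr hinf'

-- the Int-valued zero count of a list
def zcount (xs : List Int) : Int := ((xs.countP (fun y => y == 0) : Nat) : Int)

lemma zcount_singleton (x : Int) : zcount [x] = if x = 0 then 1 else 0 := by
  by_cases hx : x = 0 <;> simp [zcount, hx]

-- the fold building the zeros list, from an arbitrary seed ending in c
lemma zerosPrefix_go (xs : List Int) : ∀ (z : List Int) (c : Int),
    (PySem.List.pyGet? z (-1)).getD 0 = c →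
    xs.foldl
      (fun z x => z ++ [(PySem.List.pyGet? z (-1)).getD 0 + (if x = 0 then (1 : Int) else 0)]) z
      = z ++ (List.range xs.length).map (fun j => c + zcount (xs.take (j + 1))) := by
  induction xs with
  | nil => intro z c _; simp
  | cons x xs ih =>
    intro z c hc
    simp only [List.foldl_cons, hc]
    rw [ih (z ++ [c + (if x = 0 then (1 : Int) else 0)]) (c + (if x = 0 then (1 : Int) else 0))
      (by rw [PySem.List.pyGet?_neg_one_append_singleton]; rfl)]
    rw [List.append_assoc]
    congr 1
    rw [List.length_cons, List.range_succ_eq_map, List.map_cons, List.map_map]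
    simp only [List.singleton_append]
    congr 1
    · rw [List.take_succ_cons, List.take_zero, zcount_singleton]
    · apply List.map_congr_left
      intro j _
      simp only [Function.comp_apply, List.take_succ_cons]
      have : zcount (x :: xs.take (j + 1)) =
          (if x = 0 then (1 : Int) else 0) + zcount (xs.take (j + 1)) := by
        by_cases hx : x = 0 <;>
          simp [zcount, hx, Int.add_comm]
      rw [this]; ring

lemma zerosPrefix_eq (xs : List Int) :
    zerosPrefix xs = (List.range (xs.length + 1)).map (fun j => zcount (xs.take j)) := by
  unfold zerosPrefix
  rw [zerosPrefix_go xs [0] 0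
    (by rw [show ([0] : List Int) = [] ++ [0] from rfl,
            PySem.List.pyGet?_neg_one_append_singleton]; rfl)]
  rw [List.range_succ_eq_map, List.map_cons, List.map_map]
  simp [zcount]

lemma zeros_get (xs : List Int) (m : Nat) (hm : m ≤ xs.length) :
    (PySem.List.pyGet? (zerosPrefix xs) ((m : Nat) : Int)).getD 0 = zcount (xs.take m) := by
  rw [zerosPrefix_eq, PySem.List.pyGet?_natCast]
  simp [Nat.lt_succ_of_le hm]

lemma window_diff (xs : List Int) (j K : Nat) :
    zcount (xs.take (j + K)) - zcount (xs.take j) = zcount ((xs.drop j).take K) := by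
  rw [List.take_add]
  simp [zcount, List.countP_append]

lemma window_all_zero (xs : List Int) (j K : Nat) (h : j + K ≤ xs.length) :
    ((K : Int) ≤ zcount ((xs.drop j).take K) ↔ ∀ y ∈ (xs.drop j).take K, y = (0 : Int)) := by
  have hlen : ((xs.drop j).take K).length = K := by simp; omega
  constructor
  · intro hle y hy
    have hcle : ((xs.drop j).take K).countP (fun y => y == 0) ≤ ((xs.drop j).take K).length :=
      List.countP_le_length
    have heq : ((xs.drop j).take K).countP (fun y => y == 0) = ((xs.drop j).take K).length := by
      simp only [zcount] at hle
      rw [hlen] at hcle ⊢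
      omega
    have := (List.countP_eq_length.mp heq) y hy
    simpa using this
  · intro hz
    have heq : ((xs.drop j).take K).countP (fun y => y == 0) = ((xs.drop j).take K).length :=
      List.countP_eq_length.mpr (fun a ha => by simp [hz a ha])
    simp only [zcount, heq, hlen, le_refl]

-- B returns False iff a block of k zeros occurs in xs
lemma alt_false_iff (xs : List Int) (k : Int) (hk : 1 ≤ k) (hne : xs ≠ []) :
    (movable_alt xs k = false ↔ List.replicate k.toNat (0 : Int) <:+: xs) := by
  have hkK : (k.toNat : Int) = k := Int.toNat_of_nonneg (by omega)
  unfold movable_alt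
  rw [if_neg hne, if_neg (by omega : ¬ k ≤ 0)]
  simp only [List.all_eq_false, PySem.List.mem_pyRange_one, decide_eq_true_eq, not_lt]
  constructor
  · rintro ⟨i, ⟨h0, hi⟩, hge⟩
    have hij : ((i.toNat : Int)) = i := Int.toNat_of_nonneg h0
    have hjk : i.toNat + k.toNat ≤ xs.length := by omega
    rw [← hij, ← hkK, ← Nat.cast_add, zeros_get xs (i.toNat + k.toNat) hjk,
      zeros_get xs i.toNat (by omega)] at hge
    rw [window_diff] at hge
    have hall := (window_all_zero xs i.toNat k.toNat hjk).mp hge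
    have hlen : ((xs.drop i.toNat).take k.toNat).length = k.toNat := by simp; omega
    have hw : (xs.drop i.toNat).take k.toNat = List.replicate k.toNat (0 : Int) := by
      have := List.eq_replicate_of_mem (l := (xs.drop i.toNat).take k.toNat) (a := (0 : Int)) hall
      rwa [hlen] at this
    rw [← hw]
    exact ((List.take_prefix _ _).isInfix).trans ((List.drop_suffix _ _).isInfix)
  · rintro ⟨s, t, hst⟩
    have hlen : xs.length = s.length + k.toNat + t.length := by
      rw [← hst]; simp; omega
    refine ⟨(s.length : Int), ⟨by positivity, by omega⟩, ?_⟩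
    have hjk : s.length + k.toNat ≤ xs.length := by omega
    rw [← hkK, ← Nat.cast_add, zeros_get xs (s.length + k.toNat) hjk,
      zeros_get xs s.length (by omega), window_diff]
    have hw : (xs.drop s.length).take k.toNat = List.replicate k.toNat (0 : Int) := by
      rw [← hst, List.append_assoc, List.drop_left, List.take_left' (by simp)]
    rw [hw]
    have hc : (List.replicate k.toNat (0 : Int)).countP (fun y => y == 0) = k.toNat := by
      rw [List.countP_eq_length.mpr (fun a ha => by simp [List.eq_of_mem_replicate ha])]
      simp
    simp only [zcount, hc]
    omega

-- ===== VERDICT (by name: the statement is the Claim_ definition above) =====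
theorem movable_spec : Claim_equal_movable := by
  intro stones k _
  unfold Spec_movable
  cases stones with
  | nil => simp [movable, movableLoop, movable_alt]
  | cons x rest =>
    by_cases hk : k ≤ 0
    · have hA : movable (x :: rest) k = false := by
        simp only [movable, movableLoop]
        rw [if_pos (by split_ifs <;> omega)]
      have hB : movable_alt (x :: rest) k = false := by
        simp [movable_alt, hk]
      rw [hA, hB]
    · have hk1 : 1 ≤ k := by omega
      have hA := loop_false_iff k hk1 (x :: rest) 0 le_rfl (by omega)
      have hB := alt_false_iff (x :: rest) k hk1 (List.cons_ne_nil x rest)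
      have hAB : movable (x :: rest) k = false ↔ movable_alt (x :: rest) k = false := by
        rw [movable, hA, hB]
        constructor
        · rintro (⟨p, hp, hz, hl⟩ | h)
          · exact zero_prefix_infix k hk1 _ p hp hz (by omega)
          · exact h
        · exact Or.inr
      cases ha : movable (x :: rest) k <;> cases hb : movable_alt (x :: rest) k <;>
        simp_all
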